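-- pv_equiv track=rewrite | github.com/jorzel/codefights | challange/couldBeAnagram.py | couldBeAnagram
-- ===== SOURCE A (Python) =====
-- def couldBeAnagram(s1, s2):
--     if len(s1) != len(s2):
--         return False
--     s1_dict = {}
--     for s in s1:
--         if s not in s1_dict:
--             s1_dict[s] = 1
--         else:
--             s1_dict[s] += 1
--     for s in s2:
--         if s in s1_dict and s1_dict[s] > 0:
--             s1_dict[s] -= 1
--             if s1_dict[s] == 0:
--                 s1_dict.pop(s)
--         elif '?' in s1_dict and s1_dict['?'] > 0:
--             s1_dict['?'] -= 1
--             if s1_dict['?'] == 0: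
--                 s1_dict.pop('?')
--         else:
--             return False
--     return True if not s1_dict else False
-- ===== SOURCE B (Python) =====
-- def couldBeAnagram(s1, s2):
--     if len(s1) != len(s2):
--         return False
--     c1 = {}
--     for ch in s1:
--         c1[ch] = c1.get(ch, 0) + 1
--     c2 = {}
--     for ch in s2:
--         c2[ch] = c2.get(ch, 0) + 1
--     return all(n <= c2.get(ch, 0) for ch, n in c1.items() if ch != '?')
-- ===== Notes on version B (the rewrite author's own statement) =====
-- stated objective: simpler
-- what changed: Replaces A's greedy consume-one-character-at-a-time loop over s2 (with '?'-wildcard fallback and decrement-and-pop dict bookkeeping) by building two frequency tables once and checking that every non-'?' count of s1 is bounded by its count in s2.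
import Mathlib
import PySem

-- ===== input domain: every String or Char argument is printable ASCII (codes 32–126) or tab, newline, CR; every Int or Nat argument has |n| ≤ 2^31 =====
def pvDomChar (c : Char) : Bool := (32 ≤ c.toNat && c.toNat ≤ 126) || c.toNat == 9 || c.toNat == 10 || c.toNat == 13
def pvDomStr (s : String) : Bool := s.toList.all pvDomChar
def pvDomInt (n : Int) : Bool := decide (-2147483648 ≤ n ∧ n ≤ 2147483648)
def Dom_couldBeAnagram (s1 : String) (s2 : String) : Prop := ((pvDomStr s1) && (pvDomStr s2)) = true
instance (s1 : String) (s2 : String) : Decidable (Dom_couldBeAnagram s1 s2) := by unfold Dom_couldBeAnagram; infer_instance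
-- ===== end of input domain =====

-- B replaces A's greedy consume-with-'?'-fallback loop by comparing two frequency tables
-- (every non-'?' count in s1 must be ≤ its count in s2); objective: simpler.

-- ===== PORT A =====
-- first loop of A: build s1_dict
def cbaBuild : List Char → PySem.Dict Char Int → PySem.Dict Char Int
  | [], d => d
  | s :: rest, d =>
    if d.contains s = false then cbaBuild rest (d.insert s 1)
    else cbaBuild rest (d.modify s 0 (· + 1))

-- second loop of A: consume s2 from s1_dict, '?' as fallback; final emptiness check
def cbaConsume : PySem.Dict Char Int → List Char → Bool
  | d, [] => d.size == 0
  | d, s :: rest =>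
    if d.contains s && decide ((0:Int) < d.getD s 0) then
      let d1 := d.modify s 0 (· - 1)
      cbaConsume (if d1.getD s 0 == 0 then d1.erase s else d1) rest
    else if d.contains '?' && decide ((0:Int) < d.getD '?' 0) then
      let d1 := d.modify '?' 0 (· - 1)
      cbaConsume (if d1.getD '?' 0 == 0 then d1.erase '?' else d1) rest
    else false

def couldBeAnagram (s1 : String) (s2 : String) : Bool :=
  if PySem.Str.len s1 ≠ PySem.Str.len s2 then false
  else cbaConsume (cbaBuild s1.toList PySem.Dict.empty) s2.toList

-- ===== PORT B =====
def couldBeAnagram_alt (s1 : String) (s2 : String) : Bool :=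
  if PySem.Str.len s1 ≠ PySem.Str.len s2 then false
  else
    let c1 := s1.toList.foldl (fun d ch => d.insert ch (d.getD ch 0 + 1))
      (PySem.Dict.empty : PySem.Dict Char Int)
    let c2 := s2.toList.foldl (fun d ch => d.insert ch (d.getD ch 0 + 1))
      (PySem.Dict.empty : PySem.Dict Char Int)
    c1.items.all (fun p => p.1 == '?' || decide (p.2 ≤ c2.getD p.1 0))

-- ===== PRECONDITION & SPEC =====
def Spec_couldBeAnagram (s1 : String) (s2 : String) (out : Bool) : Prop := out = couldBeAnagram_alt s1 s2
instance (s1 : String) (s2 : String) (out : Bool) : Decidable (Spec_couldBeAnagram s1 s2 out) := by unfold Spec_couldBeAnagram; infer_instance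

-- ===== CLAIM (what is proved, stated in full; the proofs are below) =====
def Claim_equal_couldBeAnagram : Prop := ∀ (s1 : String) (s2 : String), Dom_couldBeAnagram s1 s2 → Spec_couldBeAnagram s1 s2 (couldBeAnagram s1 s2)

-- ===== LEMMAS AND PROOFS =====

-- invariant relating A's dict to the multiset of characters it still holds
def cbaP (d : PySem.Dict Char Int) (m : Multiset Char) : Prop :=
  (∀ c, d.contains c = decide (0 < m.count c)) ∧ (∀ c, d.getD c 0 = (m.count c : Int))

theorem cba_get?_erase (d : PySem.Dict Char Int) (k x : Char) :
    (d.erase k).get? x = if x = k then none else d.get? x := by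
  obtain ⟨items⟩ := d
  induction items with
  | nil => simp [PySem.Dict.erase, PySem.Dict.get?]
  | cons p rest ih =>
    simp only [PySem.Dict.erase, PySem.Dict.get?, List.filter_cons] at *
    by_cases hpk : p.1 = k <;> by_cases hpx : p.1 = x <;> simp_all

theorem cba_getD_erase (d : PySem.Dict Char Int) (k x : Char) :
    (d.erase k).getD x 0 = if x = k then 0 else d.getD x 0 := by
  simp only [PySem.Dict.getD, cba_get?_erase]
  split_ifs <;> rfl

theorem cba_contains_erase (d : PySem.Dict Char Int) (k x : Char) :
    (d.erase k).contains x = if x = k then false else d.contains x := by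
  rw [PySem.Dict.contains_eq_isSome_get?, cba_get?_erase]
  split_ifs with h
  · rfl
  · rw [PySem.Dict.contains_eq_isSome_get?]

theorem cba_build_spec (l : List Char) : ∀ d m, cbaP d m → cbaP (cbaBuild l d) (m + ↑l) := by
  induction l with
  | nil => intro d m h; simpa using h
  | cons s rest ih =>
    intro d m h
    have hrw : m + ↑(s :: rest) = (m + {s}) + ↑rest := by
      rw [← Multiset.cons_coe, add_assoc, Multiset.singleton_add]
    rw [cbaBuild, hrw]
    by_cases hmem : d.contains s = false
    · rw [if_pos hmem]
      apply ih
      have hcnt : m.count s = 0 := by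
        have := h.1 s; rw [hmem] at this
        by_contra hne
        simp [Nat.pos_of_ne_zero hne] at this
      constructor
      · intro c
        rw [PySem.Dict.contains_insert, h.1 c]
        by_cases hc : c = s <;> simp [hc, hcnt]
      · intro c
        rw [PySem.Dict.getD_insert]
        by_cases hc : c = s <;> simp [hc, hcnt, h.2 c]
    · rw [if_neg hmem]
      apply ih
      constructor
      · intro c
        rw [PySem.Dict.contains_modify, h.1 c]
        by_cases hc : c = s <;> simp [hc]
      · intro c
        rw [PySem.Dict.getD_modify]
        by_cases hc : c = s <;> simp [hc, h.2 s, h.2 c]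

-- consuming one unit of key k (A's decrement-and-maybe-pop) tracks Multiset.erase
theorem cba_step (d : PySem.Dict Char Int) (m : Multiset Char) (k : Char)
    (h : cbaP d m) (hk : 0 < m.count k) :
    cbaP (if (d.modify k 0 (· - 1)).getD k 0 == 0 then (d.modify k 0 (· - 1)).erase k
          else d.modify k 0 (· - 1)) (m.erase k) := by
  have hgd : ∀ c, (d.modify k 0 (· - 1)).getD c 0
      = if c = k then (m.count k : Int) - 1 else (m.count c : Int) := by
    intro c; rw [PySem.Dict.getD_modify]
    by_cases hc : c = k <;> simp [hc, h.2 k, h.2 c]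
  have hco : ∀ c, (d.modify k 0 (· - 1)).contains c = (c == k || d.contains c) :=
    fun c => PySem.Dict.contains_modify d k c 0 _
  by_cases hz : m.count k = 1
  · rw [if_pos (by simp [hgd, hz])]
    constructor
    · intro c
      rw [cba_contains_erase]
      by_cases hc : c = k
      · simp [hc, hz]
      · simp [hc, hco, h.1 c, Multiset.count_erase_of_ne hc]
    · intro c
      rw [cba_getD_erase]
      by_cases hc : c = k
      · simp [hc, hz]
      · simp [hc, hgd, Multiset.count_erase_of_ne hc]
  · have h2 : 2 ≤ m.count k := by omega
    rw [if_neg (by simp [hgd]; omega)]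
    constructor
    · intro c
      rw [hco]
      by_cases hc : c = k
      · simp [hc, Multiset.count_erase_self]; omega
      · simp [hc, h.1 c, Multiset.count_erase_of_ne hc]
    · intro c
      rw [hgd]
      by_cases hc : c = k
      · simp [hc, Multiset.count_erase_self]; omega
      · simp [hc, Multiset.count_erase_of_ne hc]

theorem cba_consume_spec (l : List Char) : ∀ d m, cbaP d m →
    (cbaConsume d l = true ↔
      (Multiset.card m = l.length ∧ ∀ c, c ≠ '?' → m.count c ≤ l.count c)) := by
  induction l with
  | nil =>
    intro d m h
    rw [cbaConsume]
    have hsz : d.size = 0 ↔ m = 0 := by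
      constructor
      · intro h0
        have hit : d.items = [] := List.length_eq_zero_iff.1 h0
        rw [Multiset.ext]
        intro c
        rw [Multiset.count_zero]
        have hgc := h.2 c
        unfold PySem.Dict.getD PySem.Dict.get? at hgc
        rw [hit] at hgc
        simp at hgc
        omega
      · intro h0
        have hk : d.keys = [] := by
          rw [List.eq_nil_iff_forall_not_mem]
          intro c hc
          have := (PySem.Dict.contains_iff_mem_keys d c).2 hc
          rw [h.1 c, h0] at this
          simp at this
        unfold PySem.Dict.keys at hk
        unfold PySem.Dict.size
        simp [List.map_eq_nil_iff.1 hk]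
    constructor
    · intro h0
      have hm : m = 0 := hsz.1 (by simpa using h0)
      subst hm
      simp
    · rintro ⟨hcard, -⟩
      have hm : m = 0 := Multiset.card_eq_zero.1 (by simpa using hcard)
      simp [hsz.2 hm]
  | cons s rest ih =>
    intro d m h
    rw [cbaConsume]
    by_cases h1 : 0 < m.count s
    · rw [if_pos (by simp [h.1 s, h.2 s, h1])]
      rw [ih _ _ (cba_step d m s h h1)]
      have hs : s ∈ m := Multiset.count_pos.1 h1
      have hcard' : (m.erase s).card = m.card - 1 := by
        rw [Multiset.card_erase_of_mem hs, Nat.pred_eq_sub_one]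
      have h1c : 1 ≤ m.card := le_trans h1 (Multiset.count_le_card s m)
      have hcne : ∀ c, c ≠ s → (m.erase s).count c = m.count c :=
        fun c hc => Multiset.count_erase_of_ne hc m
      have hcs : (m.erase s).count s = m.count s - 1 := Multiset.count_erase_self s m
      constructor
      · rintro ⟨hcard, hle⟩
        refine ⟨by simp only [List.length_cons]; omega, fun c hc => ?_⟩
        by_cases hceq : c = s
        · subst hceq
          rw [List.count_cons_self]
          have h2 := hle c hc
          rw [hcs] at h2
          omega
        · rw [List.count_cons_of_ne (Ne.symm hceq)]
          have h2 := hle c hc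
          rw [hcne c hceq] at h2
          exact h2
      · rintro ⟨hcard, hle⟩
        simp only [List.length_cons] at hcard
        refine ⟨by omega, fun c hc => ?_⟩
        by_cases hceq : c = s
        · subst hceq
          rw [hcs]
          have h2 := hle c hc
          rw [List.count_cons_self] at h2
          omega
        · rw [hcne c hceq]
          have h2 := hle c hc
          rw [List.count_cons_of_ne (Ne.symm hceq)] at h2
          exact h2
    · have hm0 : m.count s = 0 := Nat.eq_zero_of_not_pos h1
      rw [if_neg (by simp [h.1 s, h.2 s, hm0])]
      by_cases h2 : 0 < m.count '?'
      · rw [if_pos (by simp [h.1 '?', h.2 '?', h2])]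
        rw [ih _ _ (cba_step d m '?' h h2)]
        have hq : '?' ∈ m := Multiset.count_pos.1 h2
        have hcard' : (m.erase '?').card = m.card - 1 := by
          rw [Multiset.card_erase_of_mem hq, Nat.pred_eq_sub_one]
        have h1c : 1 ≤ m.card := le_trans h2 (Multiset.count_le_card '?' m)
        constructor
        · rintro ⟨hcard, hle⟩
          refine ⟨by simp only [List.length_cons]; omega, fun c hc => ?_⟩
          have h2' := hle c hc
          rw [Multiset.count_erase_of_ne hc m] at h2'
          by_cases hceq : c = s
          · subst hceq
            rw [List.count_cons_self]
            omega
          · rw [List.count_cons_of_ne (Ne.symm hceq)]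
            exact h2'
        · rintro ⟨hcard, hle⟩
          simp only [List.length_cons] at hcard
          refine ⟨by omega, fun c hc => ?_⟩
          rw [Multiset.count_erase_of_ne hc m]
          by_cases hceq : c = s
          · subst hceq
            omega
          · have h2' := hle c hc
            rw [List.count_cons_of_ne (Ne.symm hceq)] at h2'
            exact h2'
      · have hq0 : m.count '?' = 0 := Nat.eq_zero_of_not_pos h2
        rw [if_neg (by simp [h.1 '?', h.2 '?', hq0])]
        simp only [Bool.false_eq_true, false_iff]
        rintro ⟨hcard, hle⟩
        have hle' : m ≤ (↑(s :: rest) : Multiset Char) := by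
          rw [Multiset.le_iff_count]
          intro c
          rw [Multiset.coe_count]
          by_cases hc : c = '?'
          · subst hc; omega
          · exact hle c hc
        have heq : m = (↑(s :: rest) : Multiset Char) :=
          Multiset.eq_of_le_of_card_le hle'
            (by rw [Multiset.coe_card]; exact le_of_eq hcard.symm)
        have hcnt : m.count s = (s :: rest).count s := by
          rw [heq, Multiset.coe_count]
        rw [List.count_cons_self] at hcnt
        omega

-- A computes: lengths equal and every non-'?' count of s1 is ≤ its count in s2
theorem cba_a_iff (s1 s2 : String) :
    couldBeAnagram s1 s2 = true ↔
      (s1.toList.length = s2.toList.length ∧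
        ∀ c, c ≠ '?' → s1.toList.count c ≤ s2.toList.count c) := by
  unfold couldBeAnagram
  by_cases hlen : s1.toList.length = s2.toList.length
  · have hg : ¬(PySem.Str.len s1 ≠ PySem.Str.len s2) := by
      rw [PySem.Str.len_eq, PySem.Str.len_eq]
      exact not_not_intro (by exact_mod_cast hlen)
    rw [if_neg hg]
    have hP : cbaP (cbaBuild s1.toList PySem.Dict.empty) (↑s1.toList) := by
      have := cba_build_spec s1.toList PySem.Dict.empty 0
        ⟨fun c => by simp, fun c => by simp⟩
      simpa using this
    rw [cba_consume_spec s2.toList _ _ hP]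
    simp [Multiset.coe_card, Multiset.coe_count, hlen]
  · have hg : PySem.Str.len s1 ≠ PySem.Str.len s2 := by
      rw [PySem.Str.len_eq, PySem.Str.len_eq]
      exact fun hx => hlen (by exact_mod_cast hx)
    rw [if_pos hg]
    exact iff_of_false (by simp) (fun hx => hlen hx.1)

-- B computes the same condition, via the two counters
theorem cba_b_iff (s1 s2 : String) :
    couldBeAnagram_alt s1 s2 = true ↔
      (s1.toList.length = s2.toList.length ∧
        ∀ c, c ≠ '?' → s1.toList.count c ≤ s2.toList.count c) := by
  unfold couldBeAnagram_alt
  by_cases hlen : s1.toList.length = s2.toList.length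
  · have hg : ¬(PySem.Str.len s1 ≠ PySem.Str.len s2) := by
      rw [PySem.Str.len_eq, PySem.Str.len_eq]
      exact not_not_intro (by exact_mod_cast hlen)
    rw [if_neg hg]
    simp only [PySem.Dict.foldl_insert_getD_add_one_eq_counter]
    rw [List.all_eq_true]
    simp only [PySem.Dict.items_counter, List.mem_map]
    constructor
    · intro hall
      refine ⟨hlen, fun c hc => ?_⟩
      by_cases hmem : c ∈ s1.toList
      · have := hall (c, (s1.toList.count c : Int))
          ⟨c, (PySem.Set.mem_ofList s1.toList c).2 hmem, rfl⟩
        simp [hc, PySem.Dict.getD_counter] at this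
        exact_mod_cast this
      · simp [List.count_eq_zero_of_not_mem hmem]
    · rintro ⟨-, hall⟩ p ⟨c, hcmem, rfl⟩
      by_cases hc : c = '?'
      · simp [hc]
      · have := hall c hc
        simp [hc, PySem.Dict.getD_counter]
        exact_mod_cast this
  · have hg : PySem.Str.len s1 ≠ PySem.Str.len s2 := by
      rw [PySem.Str.len_eq, PySem.Str.len_eq]
      exact fun hx => hlen (by exact_mod_cast hx)
    rw [if_pos hg]
    exact iff_of_false (by simp) (fun hx => hlen hx.1)

-- ===== VERDICT (by name: the statement is the Claim_ definition above) =====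
theorem couldBeAnagram_spec : Claim_equal_couldBeAnagram := by
  intro s1 s2 _
  unfold Spec_couldBeAnagram
  rw [Bool.eq_iff_iff, cba_a_iff, cba_b_iff]
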